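-- pv_equiv track=rewrite | github.com/kozaka93/2025Z-DataVisualizationTechniques | projects/project2/piotrowski_ptak_stolarczyk/app.py | nearest_valid_day
-- ===== SOURCE A (Python) =====
-- def nearest_valid_day(days, target):
--     if not days:
--         return None
--     days_sorted = sorted(days)
--     if target in days_sorted:
--         return target
--     earlier = [d for d in days_sorted if d <= target]
--     if earlier:
--         return earlier[-1]
--     return days_sorted[0]
-- ===== SOURCE B (Python) =====
-- def nearest_valid_day(days, target):
--     if not days:
--         return None
--     ds = sorted(days)
--     lo, hi = 0, len(ds)
--     while lo < hi:            # binary search: bisect_right by hand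
--         mid = (lo + hi) // 2
--         if target < ds[mid]:
--             hi = mid
--         else:
--             lo = mid + 1
--     return ds[lo - 1] if lo > 0 else ds[0]
-- ===== Notes on version B (the rewrite author's own statement) =====
-- stated objective: alternative
-- what changed: Replaces the membership test plus 'earlier' list construction (two extra linear passes after sorting) with a single hand-written binary search (bisect_right) on the sorted list; the largest day <= target, or the minimum when none exists, is read off from the insertion point.
import Mathlib
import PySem

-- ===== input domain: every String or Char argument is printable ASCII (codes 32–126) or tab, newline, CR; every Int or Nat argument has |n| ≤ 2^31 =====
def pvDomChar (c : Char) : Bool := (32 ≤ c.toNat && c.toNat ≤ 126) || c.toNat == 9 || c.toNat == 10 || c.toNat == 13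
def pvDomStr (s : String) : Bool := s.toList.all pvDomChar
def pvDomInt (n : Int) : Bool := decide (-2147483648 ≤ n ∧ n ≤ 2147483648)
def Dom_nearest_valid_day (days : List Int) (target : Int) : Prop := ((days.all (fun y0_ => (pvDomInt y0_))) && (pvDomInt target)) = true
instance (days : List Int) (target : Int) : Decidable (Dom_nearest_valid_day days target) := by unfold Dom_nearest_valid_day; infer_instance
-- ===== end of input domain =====

-- B replaces A's membership test and 'earlier' list construction by a hand-written
-- binary search (bisect_right) on the sorted list; same result, different traversal.


-- ===== PORT A =====
def nearest_valid_day (days : List Int) (target : Int) : Option Int :=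
  if days = [] then none
  else
    let days_sorted := PySem.List.sorted days (fun d => d) false
    if target ∈ days_sorted then some target
    else
      let earlier := days_sorted.filter (fun d => d ≤ target)
      if earlier ≠ [] then PySem.List.pyGet? earlier (-1)   -- earlier[-1]; in range (earlier nonempty)
      else PySem.List.pyGet? days_sorted 0                  -- days_sorted[0]; in range (days nonempty)

-- ===== PORT B =====
-- the hand-written while-loop of Source B: lo, hi shrink until lo is the bisect_right
-- position; fuel is only a totality device (hi - lo shrinks each iteration, so
-- fuel = ds.length never runs out at the call site)
def bsLoop (ds : List Int) (x : Int) : Nat → Nat → Nat → Nat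
  | 0, lo, _hi => lo
  | Nat.succ fuel, lo, hi =>
    if lo < hi then
      let mid := (lo + hi) / 2
      if x < ds.getD mid 0 then bsLoop ds x fuel lo mid    -- ds[mid]: mid < hi ≤ len inside the loop
      else bsLoop ds x fuel (mid + 1) hi
    else lo

def nearest_valid_day_alt (days : List Int) (target : Int) : Option Int :=
  if days = [] then none
  else
    let ds := PySem.List.sorted days (fun d => d) false
    let lo := bsLoop ds target ds.length 0 ds.length
    if lo > 0 then PySem.List.pyGet? ds ((lo : Int) - 1)    -- ds[lo-1]; in range
    else PySem.List.pyGet? ds 0                             -- ds[0]; in range (days nonempty)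

-- ===== PRECONDITION & SPEC =====
def Spec_nearest_valid_day (days : List Int) (target : Int) (out : Option Int) : Prop := out = nearest_valid_day_alt days target
instance (days : List Int) (target : Int) (out : Option Int) : Decidable (Spec_nearest_valid_day days target out) := by unfold Spec_nearest_valid_day; infer_instance

-- ===== CLAIM (what is proved, stated in full; the proofs are below) =====
def Claim_equal_nearest_valid_day : Prop := ∀ (days : List Int) (target : Int), Dom_nearest_valid_day days target → Spec_nearest_valid_day days target (nearest_valid_day days target)

-- ===== LEMMAS AND PROOFS =====

-- the loop computes a bisect_right position on a sorted list:
-- everything strictly left of the result is ≤ x, everything at/right of it is > x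
theorem bsLoop_spec (ds : List Int) (x : Int)
    (hsort : ds.Pairwise (· ≤ ·)) : ∀ (fuel lo hi : Nat),
    hi - lo ≤ fuel → hi ≤ ds.length → lo ≤ hi →
    (∀ j, (hj : j < ds.length) → j < lo → ds[j] ≤ x) →
    (∀ j, (hj : j < ds.length) → hi ≤ j → x < ds[j]) →
    bsLoop ds x fuel lo hi ≤ ds.length ∧
      (∀ j, (hj : j < ds.length) → j < bsLoop ds x fuel lo hi → ds[j] ≤ x) ∧
      (∀ j, (hj : j < ds.length) → bsLoop ds x fuel lo hi ≤ j → x < ds[j]) := by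
  have hmono : ∀ i j, (hi' : i < ds.length) → (hj : j < ds.length) → i ≤ j → ds[i] ≤ ds[j] := by
    intro i j hi' hj hij
    rcases Nat.lt_or_eq_of_le hij with h | h
    · exact (List.pairwise_iff_getElem.mp hsort) i j hi' hj h
    · subst h; exact le_refl _
  intro fuel
  induction fuel with
  | zero =>
      intro lo hi hfuel hhi hlohi hleft hright
      exact ⟨by simp [bsLoop]; omega,
        fun j hj hjlo => hleft j hj (by simpa [bsLoop] using hjlo),
        fun j hj hloj => hright j hj (by simp [bsLoop] at hloj; omega)⟩
  | succ n ih =>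
      intro lo hi hfuel hhi hlohi hleft hright
      by_cases h : lo < hi
      · have hmid : (lo + hi) / 2 < ds.length := by omega
        by_cases hc : x < ds.getD ((lo + hi) / 2) 0
        · have hx : x < ds[(lo + hi) / 2] := by
            simpa [List.getD_eq_getElem?_getD, hmid] using hc
          have heq : bsLoop ds x (n + 1) lo hi = bsLoop ds x n lo ((lo + hi) / 2) := by
            simp only [bsLoop, if_pos h]; exact if_pos hc
          rw [heq]
          exact ih lo ((lo + hi) / 2) (by omega) (by omega) (by omega) hleft
            (fun j hj hmj => lt_of_lt_of_le hx (hmono _ j hmid hj hmj))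
        · have hx : ds[(lo + hi) / 2] ≤ x := by
            have := hc
            simp [List.getD_eq_getElem?_getD, hmid] at this
            omega
          have heq : bsLoop ds x (n + 1) lo hi = bsLoop ds x n ((lo + hi) / 2 + 1) hi := by
            simp only [bsLoop, if_pos h]; exact if_neg hc
          rw [heq]
          exact ih ((lo + hi) / 2 + 1) hi (by omega) hhi (by omega)
            (fun j hj hmj => le_trans (hmono j _ hj hmid (by omega)) hx) hright
      · have heq : bsLoop ds x (n + 1) lo hi = lo := by simp [bsLoop, h]
        rw [heq]
        exact ⟨by omega, fun j hj hjlo => hleft j hj hjlo, fun j hj hloj => hright j hj (by omega)⟩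

theorem nearest_valid_day_eq_alt : ∀ (days : List Int) (target : Int),
    nearest_valid_day days target = nearest_valid_day_alt days target := by
  intro days target
  unfold nearest_valid_day nearest_valid_day_alt
  by_cases hd : days = []
  · simp [hd]
  simp only [if_neg hd]
  set ds := PySem.List.sorted days (fun d => d) false with hds
  have hsort : ds.Pairwise (· ≤ ·) := PySem.List.sorted_pairwise days (fun d => d)
  have hlen : ds.length = days.length := PySem.List.length_sorted days (fun d => d) false
  have hne : 0 < ds.length := by
    rw [hlen]; exact List.length_pos_iff.mpr hd
  have hmono : ∀ i j, (hi' : i < ds.length) → (hj : j < ds.length) → i ≤ j → ds[i] ≤ ds[j] := by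
    intro i j hi' hj hij
    rcases Nat.lt_or_eq_of_le hij with h | h
    · exact (List.pairwise_iff_getElem.mp hsort) i j hi' hj h
    · subst h; exact le_refl _
  set r := bsLoop ds target ds.length 0 ds.length with hr
  obtain ⟨hrlen, hA, hB⟩ := bsLoop_spec ds target hsort ds.length 0 ds.length (by omega) le_rfl (Nat.zero_le _)
    (fun j hj hj0 => absurd hj0 (by omega)) (fun j hj hij => absurd hij (by omega))
  have hidx : ∀ (h1 : 0 < r), PySem.List.pyGet? ds ((r : Int) - 1) = some ds[r - 1] := by
    intro h1
    have : ((r : Int) - 1) = ((r - 1 : Nat) : Int) := by omega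
    rw [this, PySem.List.pyGet?_natCast, List.getElem?_eq_getElem (by omega)]
  by_cases hmem : target ∈ ds
  · simp only [if_pos hmem]
    obtain ⟨k, hk, hdk⟩ := List.mem_iff_getElem.mp hmem
    have hkr : k < r := by
      by_contra hc
      have := hB k hk (by omega)
      omega
    have h1 : 0 < r := by omega
    have hv : ds[r - 1] = target := by
      have h2 := hA (r - 1) (by omega) (by omega)
      have h3 : ds[k] ≤ ds[r - 1] := hmono k (r - 1) hk (by omega) (by omega)
      omega
    rw [if_pos h1, hidx h1, hv]
  · simp only [if_neg hmem]
    have htake : ds.filter (fun d => d ≤ target) = ds.take r := by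
      conv_lhs => rw [← List.take_append_drop r ds]
      rw [List.filter_append]
      have h1 : (ds.take r).filter (fun d => decide (d ≤ target)) = ds.take r := by
        apply List.filter_eq_self.mpr
        intro a ha
        obtain ⟨i, hi, hia⟩ := List.getElem_of_mem ha
        rw [List.getElem_take] at hia
        have : i < r := by have := List.length_take_le r ds; omega
        simpa [← hia] using hA i (by omega) this
      have h2 : (ds.drop r).filter (fun d => decide (d ≤ target)) = [] := by
        apply List.filter_eq_nil_iff.mpr
        intro a ha
        obtain ⟨i, hi, hia⟩ := List.getElem_of_mem ha
        rw [List.getElem_drop] at hia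
        have := hB (r + i) (by rw [List.length_drop] at hi; omega) (by omega)
        simp [← hia]; omega
      rw [h1, h2, List.append_nil]
    by_cases h1 : 0 < r
    · have hner : ds.take r ≠ [] := by
        intro hc
        have h2 : (ds.take r).length = 0 := by rw [hc]; rfl
        rw [List.length_take] at h2
        omega
      rw [if_pos (by rw [htake]; exact hner), if_pos h1, hidx h1, htake]
      rw [PySem.List.pyGet?_neg_one, List.getLast?_eq_getElem?]
      have hlt : (ds.take r).length = r := by simp; omega
      rw [hlt, List.getElem?_take_of_lt (by omega), List.getElem?_eq_getElem (by omega)]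
    · have hr0 : r = 0 := by omega
      rw [if_neg (by simp [htake, hr0]), if_neg h1]

-- ===== VERDICT (by name: the statement is the Claim_ definition above) =====
theorem nearest_valid_day_spec : Claim_equal_nearest_valid_day := by
  intro days target _
  unfold Spec_nearest_valid_day
  exact nearest_valid_day_eq_alt days target
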